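-- pv_equiv track=rewrite | github.com/kerkocmatija/TKK | TKK_DN2/NapredniGeffe.py | odkodiraj
-- ===== SOURCE A (Python) =====
-- slovar_dvojiskih2 = {'00000': 'A', '00001': 'B', '00010': 'C', '00011': 'D',
--                      '00100': 'E', '00101': 'F', '00110': 'G', '00111': 'H',
--                      '01000': 'I', '01001': 'J', '01010': 'K', '01011': 'L',
--                      '01100': 'M', '01101': 'N', '01110': 'O', '01111': 'P',
--                      '10000': 'Q', '10001': 'R', '10010': 'S', '10011': 'T',
--                      '10100': 'U', '10101': 'V', '10110': 'W', '10111': 'X',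
--                      '11000': 'Y', '11001': 'Z'}
--
-- def odkodiraj(koda):
--     """Funkcija prejme besedilo, ter iz njega konstruira besedilo v abecednem zapisu."""
--     besedilo = ''
--     for i in range(0, len(koda), 5):
--         if koda[i:i + 5] not in slovar_dvojiskih2.keys():
--             besedilo += 'X'
--         else:
--             besedilo += slovar_dvojiskih2[koda[i:i + 5]]
--     return besedilo
-- ===== SOURCE B (Python) =====
-- def odkodiraj(koda):
--     """Funkcija prejme besedilo, ter iz njega konstruira besedilo v abecednem zapisu."""
--     out = []
--     n = 0
--     v = 0
--     ok = True
--     for c in koda: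
--         if c == '0':
--             v = 2 * v
--         elif c == '1':
--             v = 2 * v + 1
--         else:
--             ok = False
--         n += 1
--         if n == 5:
--             out.append(chr(65 + v) if ok and v < 26 else 'X')
--             n = 0
--             v = 0
--             ok = True
--     if n:
--         out.append('X')
--     return ''.join(out)
-- ===== Notes on version B (the rewrite author's own statement) =====
-- stated objective: alternative
-- what changed: B is a streaming single-pass decoder: it scans the string character by character keeping a Horner accumulator (value, bit-count, validity flag) and emits a letter each time 5 characters have been consumed, so the 26-entry dictionary, the stride-5 index loop and all slicing disappear.
import Mathlib
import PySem

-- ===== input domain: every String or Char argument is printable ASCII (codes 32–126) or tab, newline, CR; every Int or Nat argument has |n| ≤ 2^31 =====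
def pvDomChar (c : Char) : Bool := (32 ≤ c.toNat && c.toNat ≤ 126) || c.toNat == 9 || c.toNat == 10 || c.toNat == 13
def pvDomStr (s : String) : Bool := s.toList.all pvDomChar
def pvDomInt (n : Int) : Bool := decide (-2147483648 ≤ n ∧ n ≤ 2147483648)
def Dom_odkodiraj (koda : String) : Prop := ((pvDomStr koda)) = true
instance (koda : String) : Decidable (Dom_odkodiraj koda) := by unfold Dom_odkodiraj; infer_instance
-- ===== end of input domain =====

-- B replaces A's stride-5 slice-and-dictionary loop by a streaming single-pass decoder
-- with a Horner accumulator (alternative decomposition; return values proved equal, no speed claim).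

-- ===== PORT A =====
-- the module-level dict slovar_dvojiskih2 (string keys, one-char string values ported as Char)
def pvSlovar : PySem.Dict (List Char) Char := PySem.Dict.ofList
  [("00000".toList, 'A'), ("00001".toList, 'B'), ("00010".toList, 'C'), ("00011".toList, 'D'),
   ("00100".toList, 'E'), ("00101".toList, 'F'), ("00110".toList, 'G'), ("00111".toList, 'H'),
   ("01000".toList, 'I'), ("01001".toList, 'J'), ("01010".toList, 'K'), ("01011".toList, 'L'),
   ("01100".toList, 'M'), ("01101".toList, 'N'), ("01110".toList, 'O'), ("01111".toList, 'P'),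
   ("10000".toList, 'Q'), ("10001".toList, 'R'), ("10010".toList, 'S'), ("10011".toList, 'T'),
   ("10100".toList, 'U'), ("10101".toList, 'V'), ("10110".toList, 'W'), ("10111".toList, 'X'),
   ("11000".toList, 'Y'), ("11001".toList, 'Z')]

-- for i in range(0, len(koda), 5): lookup koda[i:i+5] in the dict, else 'X'
def odkodiraj (koda : String) : String :=
  String.ofList ((PySem.List.pyRange 0 koda.toList.length 5).foldl
    (fun bes i =>
      if pvSlovar.contains (PySem.List.slice koda.toList (some i) (some (i + 5))) = false then
        bes ++ ['X']
      else
        bes ++ [(pvSlovar.get? (PySem.List.slice koda.toList (some i) (some (i + 5)))).getD 'X'])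
    [])

-- ===== PORT B =====
-- per-character step of Source B's for loop; state = (out, n, v, ok)
def pvStep (st : List Char × Nat × Nat × Bool) (c : Char) : List Char × Nat × Nat × Bool :=
  let out := st.1
  let n := st.2.1
  let v := st.2.2.1
  let ok := st.2.2.2
  let vo := if c = '0' then (2 * v, ok) else if c = '1' then (2 * v + 1, ok) else (v, false)
  let n' := n + 1
  if n' = 5 then
    (out ++ [if vo.2 ∧ vo.1 < 26 then Char.ofNat (65 + vo.1) else 'X'], 0, 0, true)
  else
    (out, n', vo.1, vo.2)

def odkodiraj_alt (koda : String) : String :=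
  String.ofList
    (if (koda.toList.foldl pvStep ([], 0, 0, true)).2.1 ≠ 0 then
      (koda.toList.foldl pvStep ([], 0, 0, true)).1 ++ ['X']
    else
      (koda.toList.foldl pvStep ([], 0, 0, true)).1)

-- ===== PRECONDITION & SPEC =====
def Spec_odkodiraj (koda : String) (out : String) : Prop := out = odkodiraj_alt koda
instance (koda : String) (out : String) : Decidable (Spec_odkodiraj koda out) := by unfold Spec_odkodiraj; infer_instance

-- ===== CLAIM (what is proved, stated in full; the proofs are below) =====
def Claim_equal_odkodiraj : Prop := ∀ (koda : String), Dom_odkodiraj koda → Spec_odkodiraj koda (odkodiraj koda)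

-- ===== LEMMAS AND PROOFS =====

-- proof-side chunk decoder: Horner accumulator over one chunk, and the common spec pvDec
def pvEmit (st : Nat × Bool) (c : Char) : Nat × Bool :=
  if c = '0' then (2 * st.1, st.2) else if c = '1' then (2 * st.1 + 1, st.2) else (st.1, false)

def pvLetter (st : Nat × Bool) : Char :=
  if st.2 ∧ st.1 < 26 then Char.ofNat (65 + st.1) else 'X'

def pvDec : List Char → List Char
  | a :: b :: c :: d :: e :: rest => pvLetter ([a, b, c, d, e].foldl pvEmit (0, true)) :: pvDec rest
  | [] => []
  | _ => ['X']

-- A's per-chunk lookup as a function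
def pvLook (chunk : List Char) : Char :=
  if pvSlovar.contains chunk = false then 'X' else (pvSlovar.get? chunk).getD 'X'

set_option maxRecDepth 20000 in
theorem pvSlovar_keys : pvSlovar.keys = [['0', '0', '0', '0', '0'], ['0', '0', '0', '0', '1'], ['0', '0', '0', '1', '0'], ['0', '0', '0', '1', '1'], ['0', '0', '1', '0', '0'], ['0', '0', '1', '0', '1'], ['0', '0', '1', '1', '0'], ['0', '0', '1', '1', '1'], ['0', '1', '0', '0', '0'], ['0', '1', '0', '0', '1'], ['0', '1', '0', '1', '0'], ['0', '1', '0', '1', '1'], ['0', '1', '1', '0', '0'], ['0', '1', '1', '0', '1'], ['0', '1', '1', '1', '0'], ['0', '1', '1', '1', '1'], ['1', '0', '0', '0', '0'], ['1', '0', '0', '0', '1'], ['1', '0', '0', '1', '0'], ['1', '0', '0', '1', '1'], ['1', '0', '1', '0', '0'], ['1', '0', '1', '0', '1'], ['1', '0', '1', '1', '0'], ['1', '0', '1', '1', '1'], ['1', '1', '0', '0', '0'], ['1', '1', '0', '0', '1']] := by rfl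

-- every key of the dict is a 5-character binary string
set_option maxRecDepth 20000 in
theorem contains_shape (chunk : List Char) (h : pvSlovar.contains chunk = true) :
    chunk.length = 5 ∧ ∀ c ∈ chunk, c = '0' ∨ c = '1' := by
  rw [PySem.Dict.contains_iff_mem_keys, pvSlovar_keys] at h
  simp only [List.mem_cons, List.not_mem_nil, or_false] at h
  rcases h with h|h|h|h|h|h|h|h|h|h|h|h|h|h|h|h|h|h|h|h|h|h|h|h|h|h <;> subst h <;>
    · refine ⟨rfl, ?_⟩
      intro c hc
      simp only [List.mem_cons, List.not_mem_nil, or_false] at hc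
      rcases hc with rfl|rfl|rfl|rfl|rfl <;> simp

theorem pvLook_short (chunk : List Char) (h : chunk.length ≠ 5) : pvLook chunk = 'X' := by
  have hco : pvSlovar.contains chunk = false := by
    cases hcc : pvSlovar.contains chunk
    · rfl
    · exact absurd (contains_shape chunk hcc).1 h
  simp [pvLook, hco]

-- once ok is false it stays false
theorem pvEmit_false (l : List Char) (v : Nat) : (l.foldl pvEmit (v, false)).2 = false := by
  induction l generalizing v with
  | nil => rfl
  | cons c l ih =>
    simp only [List.foldl, pvEmit]
    split_ifs <;> exact ih _

-- a non-binary character anywhere forces ok = false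
theorem pvEmit_bad (l : List Char) (st : Nat × Bool) (x : Char) (hx : x ∈ l)
    (h0 : x ≠ '0') (h1 : x ≠ '1') : (l.foldl pvEmit st).2 = false := by
  induction l generalizing st with
  | nil => simp at hx
  | cons c l ih =>
    rcases List.mem_cons.mp hx with rfl | hx'
    · simp only [List.foldl, pvEmit, if_neg h0, if_neg h1]
      exact pvEmit_false l _
    · exact ih _ hx'

-- the per-chunk results of the two programs agree on every full chunk
set_option maxRecDepth 20000 in
theorem pvLook_chunk (a b c d e : Char) :
    pvLook [a, b, c, d, e] = pvLetter ([a, b, c, d, e].foldl pvEmit (0, true)) := by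
  by_cases hall : ∀ x ∈ [a, b, c, d, e], x = '0' ∨ x = '1'
  · have ha := hall a (by simp)
    have hb := hall b (by simp)
    have hc := hall c (by simp)
    have hd := hall d (by simp)
    have he := hall e (by simp)
    rcases ha with rfl | rfl <;> rcases hb with rfl | rfl <;> rcases hc with rfl | rfl <;>
      rcases hd with rfl | rfl <;> rcases he with rfl | rfl <;> decide
  · push Not at hall
    obtain ⟨x, hx, hx0, hx1⟩ := hall
    have hco : pvSlovar.contains [a, b, c, d, e] = false := by
      cases hcc : pvSlovar.contains [a, b, c, d, e]
      · rfl
      · exact absurd ((contains_shape _ hcc).2 x hx) (by simp [hx0, hx1])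
    have hbad := pvEmit_bad [a, b, c, d, e] (0, true) x hx hx0 hx1
    simp only [List.foldl] at hbad
    simp [pvLook, pvLetter, hco, hbad]

-- === B side: the streaming fold computes pvDec ===

theorem pvStep_mid (out : List Char) (n : Nat) (st : Nat × Bool) (c : Char) (h : n + 1 ≠ 5) :
    pvStep (out, n, st) c = (out, n + 1, pvEmit st c) := by
  obtain ⟨v, ok⟩ := st
  simp only [pvStep, pvEmit, if_neg h]

theorem pvStep_last (out : List Char) (st : Nat × Bool) (c : Char) :
    pvStep (out, 4, st) c = (out ++ [pvLetter (pvEmit st c)], 0, 0, true) := by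
  obtain ⟨v, ok⟩ := st
  simp only [pvStep, pvEmit, pvLetter]
  split_ifs <;> rfl

theorem pvChunk (out : List Char) (st : Nat × Bool) (a b c d e : Char) :
    [a, b, c, d, e].foldl pvStep (out, 0, st) =
      (out ++ [pvLetter ([a, b, c, d, e].foldl pvEmit st)], 0, 0, true) := by
  simp only [List.foldl]
  rw [pvStep_mid _ 0 _ _ (by decide), pvStep_mid _ 1 _ _ (by decide),
    pvStep_mid _ 2 _ _ (by decide), pvStep_mid _ 3 _ _ (by decide), pvStep_last]

def pvFin (st : List Char × Nat × Nat × Bool) : List Char :=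
  if st.2.1 ≠ 0 then st.1 ++ ['X'] else st.1

theorem pvB_main (l : List Char) (out : List Char) :
    pvFin (l.foldl pvStep (out, 0, 0, true)) = out ++ pvDec l := by
  match l with
  | [] => simp [pvFin, pvDec]
  | [a] =>
    rw [show ([a] : List Char).foldl pvStep (out, 0, 0, true) =
      pvStep (out, 0, 0, true) a from rfl, pvStep_mid _ 0 _ _ (by decide)]
    simp [pvFin, pvDec]
  | [a, b] =>
    rw [show ([a, b] : List Char).foldl pvStep (out, 0, 0, true) =
      pvStep (pvStep (out, 0, 0, true) a) b from rfl,
      pvStep_mid _ 0 _ _ (by decide), pvStep_mid _ 1 _ _ (by decide)]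
    simp [pvFin, pvDec]
  | [a, b, c] =>
    rw [show ([a, b, c] : List Char).foldl pvStep (out, 0, 0, true) =
      pvStep (pvStep (pvStep (out, 0, 0, true) a) b) c from rfl,
      pvStep_mid _ 0 _ _ (by decide), pvStep_mid _ 1 _ _ (by decide),
      pvStep_mid _ 2 _ _ (by decide)]
    simp [pvFin, pvDec]
  | [a, b, c, d] =>
    rw [show ([a, b, c, d] : List Char).foldl pvStep (out, 0, 0, true) =
      pvStep (pvStep (pvStep (pvStep (out, 0, 0, true) a) b) c) d from rfl,
      pvStep_mid _ 0 _ _ (by decide), pvStep_mid _ 1 _ _ (by decide),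
      pvStep_mid _ 2 _ _ (by decide), pvStep_mid _ 3 _ _ (by decide)]
    simp [pvFin, pvDec]
  | a :: b :: c :: d :: e :: rest =>
    have hsplit : (a :: b :: c :: d :: e :: rest : List Char) = [a, b, c, d, e] ++ rest := rfl
    rw [hsplit, List.foldl_append, pvChunk, pvB_main rest _]
    simp [pvDec]
termination_by l.length

-- === A side: the range-and-slice map computes pvDec ===

theorem pvRange5_succ (m : Nat) :
    PySem.List.pyRange 0 ((m : Int) + 5) 5 = 0 :: (PySem.List.pyRange 0 (m : Int) 5).map (· + 5) := by
  rw [PySem.List.pyRange_of_pos _ _ (by norm_num), PySem.List.pyRange_of_pos _ _ (by norm_num)]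
  rcases Nat.eq_zero_or_pos m with rfl | hm
  · decide
  · have h0 : (0 : Int) < (m : Int) + 5 := by positivity
    have h1 : (0 : Int) < (m : Int) := by exact_mod_cast hm
    rw [if_pos h0, if_pos h1]
    have hc : (((m : Int) + 5 - 0 + 5 - 1) / 5).toNat = (((m : Int) - 0 + 5 - 1) / 5).toNat + 1 := by
      omega
    rw [hc, List.range_succ_eq_map]
    simp only [List.map_cons, List.map_map]
    refine List.cons_eq_cons.mpr ⟨by norm_num, ?_⟩
    apply List.map_congr_left
    intro k _
    simp only [Function.comp_apply]
    push_cast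
    ring

theorem pvA_main (l : List Char) :
    (PySem.List.pyRange 0 l.length 5).map
      (fun i => pvLook (PySem.List.slice l (some i) (some (i + 5)))) = pvDec l := by
  match l with
  | [] => rfl
  | [a] =>
    rw [show (([a] : List Char).length : Int) = ((1 : Nat) : Int) from by norm_num,
      show PySem.List.pyRange 0 ((1 : Nat) : Int) 5 = [0] from by decide,
      List.map_cons, List.map_nil,
      PySem.List.slice_toNat _ (by norm_num) (by norm_num)]
    simp [pvLook_short, pvDec]
  | [a, b] =>
    rw [show (([a, b] : List Char).length : Int) = ((2 : Nat) : Int) from by norm_num,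
      show PySem.List.pyRange 0 ((2 : Nat) : Int) 5 = [0] from by decide,
      List.map_cons, List.map_nil,
      PySem.List.slice_toNat _ (by norm_num) (by norm_num)]
    simp [pvLook_short, pvDec]
  | [a, b, c] =>
    rw [show (([a, b, c] : List Char).length : Int) = ((3 : Nat) : Int) from by norm_num,
      show PySem.List.pyRange 0 ((3 : Nat) : Int) 5 = [0] from by decide,
      List.map_cons, List.map_nil,
      PySem.List.slice_toNat _ (by norm_num) (by norm_num)]
    simp [pvLook_short, pvDec]
  | [a, b, c, d] =>
    rw [show (([a, b, c, d] : List Char).length : Int) = ((4 : Nat) : Int) from by norm_num,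
      show PySem.List.pyRange 0 ((4 : Nat) : Int) 5 = [0] from by decide,
      List.map_cons, List.map_nil,
      PySem.List.slice_toNat _ (by norm_num) (by norm_num)]
    simp [pvLook_short, pvDec]
  | a :: b :: c :: d :: e :: rest =>
    have hlen : ((a :: b :: c :: d :: e :: rest : List Char).length : Int) = (rest.length : Int) + 5 := by
      simp; ring
    rw [hlen, pvRange5_succ, List.map_cons, List.map_map]
    have hhead : PySem.List.slice (a :: b :: c :: d :: e :: rest) (some 0) (some (0 + 5)) = [a, b, c, d, e] := by
      rw [PySem.List.slice_toNat _ (by norm_num) (by norm_num)]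
      rfl
    have htail : ∀ i ∈ PySem.List.pyRange 0 (rest.length : Int) 5,
        pvLook (PySem.List.slice (a :: b :: c :: d :: e :: rest) (some (i + 5)) (some (i + 5 + 5))) =
          pvLook (PySem.List.slice rest (some i) (some (i + 5))) := by
      intro i hi
      have hpos : 0 ≤ i :=
        ((PySem.List.mem_pyRange_iff_of_pos (by norm_num) i).mp hi).1
      rw [PySem.List.slice_toNat _ (by omega) (by omega),
        PySem.List.slice_toNat _ (by omega) (by omega)]
      have h1 : (i + 5).toNat = i.toNat + 5 := by omega
      rw [h1]
      have h2 : (i + 5 + 5).toNat - (i.toNat + 5) = 5 := by omega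
      have h3 : i.toNat + 5 - i.toNat = 5 := by omega
      rw [h2, h3]
      have hdrop : List.drop (i.toNat + 5) (a :: b :: c :: d :: e :: rest) =
          List.drop i.toNat rest := by
        rw [show i.toNat + 5 = 5 + i.toNat from by omega, ← List.drop_drop]
        rfl
      rw [hdrop]
    rw [hhead, pvLook_chunk]
    show _ = pvDec (a :: b :: c :: d :: e :: rest)
    rw [pvDec]
    congr 1
    rw [← pvA_main rest]
    exact List.map_congr_left htail
termination_by l.length

-- ===== VERDICT (by name: the statement is the Claim_ definition above) =====
theorem odkodiraj_spec : Claim_equal_odkodiraj := by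
  intro koda _
  unfold Spec_odkodiraj odkodiraj odkodiraj_alt
  have hA : (PySem.List.pyRange 0 koda.toList.length 5).foldl
      (fun bes i =>
        if pvSlovar.contains (PySem.List.slice koda.toList (some i) (some (i + 5))) = false then
          bes ++ ['X']
        else
          bes ++ [(pvSlovar.get? (PySem.List.slice koda.toList (some i) (some (i + 5)))).getD 'X'])
      [] = pvDec koda.toList := by
    have hfn : ∀ (bes : List Char) (i : Int),
        (if pvSlovar.contains (PySem.List.slice koda.toList (some i) (some (i + 5))) = false then
          bes ++ ['X']
        else
          bes ++ [(pvSlovar.get? (PySem.List.slice koda.toList (some i) (some (i + 5)))).getD 'X']) =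
        bes ++ [pvLook (PySem.List.slice koda.toList (some i) (some (i + 5)))] := by
      intro bes i
      unfold pvLook
      split <;> rfl
    calc _ = (PySem.List.pyRange 0 koda.toList.length 5).foldl
            (fun bes i => bes ++ [pvLook (PySem.List.slice koda.toList (some i) (some (i + 5)))]) [] := by
            apply PySem.List.foldl_congr_mem
            intro acc x _
            exact hfn acc x
      _ = (PySem.List.pyRange 0 koda.toList.length 5).map
            (fun i => pvLook (PySem.List.slice koda.toList (some i) (some (i + 5)))) := by
            rw [PySem.List.foldl_append_singleton_eq_map]; rfl
      _ = pvDec koda.toList := pvA_main koda.toList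
  have hB := pvB_main koda.toList []
  rw [hA]
  simp only [pvFin] at hB
  rw [hB]
  rfl
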